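-- pv_equiv track=rewrite | github.com/Andrii-Kuts/hs.python2 | messenger.py | __frame_text
-- ===== SOURCE A (Python) =====
-- class colors:
--     RESET = '\033[0m'
--     GREEN = '\033[92m'
--     BLUE = '\033[94m'
--     YELLOW = '\033[93m'
--
-- def __frame_text(lines: list[str], padding_x: int = 2, padding_y: int = 1, frame_char: str = "#", prefix: str = colors.RESET, suffix: str = colors.RESET) -> list[str]:
--     max_len = max(map(len, lines))
--     result = []
--     result.append(prefix + frame_char * (max_len + padding_x*2 + 2) + suffix)
--     for i in range(padding_y):
--         result.append(prefix + frame_char + " " * (max_len + padding_x*2) + frame_char + suffix)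
--     for line in lines:
--         result.append(prefix + frame_char + " " * padding_x + line + " " * (padding_x + max_len - len(line)) + frame_char + suffix)
--     for i in range(padding_y):
--         result.append(prefix + frame_char + " " * (max_len + padding_x*2) + frame_char + suffix)
--     result.append(prefix + frame_char * (max_len + padding_x*2 + 2) + suffix)
--     return result
-- ===== SOURCE B (Python) =====
-- class colors:
--     RESET = '\033[0m'
--     GREEN = '\033[92m'
--     BLUE = '\033[94m'
--     YELLOW = '\033[93m'
--
-- def __frame_text(lines: list[str], padding_x: int = 2, padding_y: int = 1, frame_char: str = "#", prefix: str = colors.RESET, suffix: str = colors.RESET) -> list[str]: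
--     max_len = max(map(len, lines))
--     p = max(padding_y, 0)
--     total = len(lines) + 2 * p + 2
--     result = []
--     for i in range(total):
--         if i == 0 or i == total - 1:
--             result.append(prefix + frame_char * (max_len + padding_x * 2 + 2) + suffix)
--         elif i <= p or i >= total - 1 - p:
--             result.append(prefix + frame_char + " " * (max_len + padding_x * 2) + frame_char + suffix)
--         else:
--             line = lines[i - 1 - p]
--             result.append(prefix + frame_char + " " * padding_x + line + " " * (padding_x + max_len - len(line)) + frame_char + suffix)
--     return result
-- ===== Notes on version B (the rewrite author's own statement) =====
-- stated objective: alternative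
-- what changed: Replaced A's staged construction (border, then three separate append-loops for top padding, content and bottom padding, then border) by a single index-dispatch loop over range(total_rows) that classifies each row index arithmetically as border, padding or content row and fetches the content line by computed index lines[i - 1 - p].
-- outside the precondition, e.g. on __frame_text([], 2, 1, '#', '', ''): A raises ValueError, B raises ValueError
import Mathlib
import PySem

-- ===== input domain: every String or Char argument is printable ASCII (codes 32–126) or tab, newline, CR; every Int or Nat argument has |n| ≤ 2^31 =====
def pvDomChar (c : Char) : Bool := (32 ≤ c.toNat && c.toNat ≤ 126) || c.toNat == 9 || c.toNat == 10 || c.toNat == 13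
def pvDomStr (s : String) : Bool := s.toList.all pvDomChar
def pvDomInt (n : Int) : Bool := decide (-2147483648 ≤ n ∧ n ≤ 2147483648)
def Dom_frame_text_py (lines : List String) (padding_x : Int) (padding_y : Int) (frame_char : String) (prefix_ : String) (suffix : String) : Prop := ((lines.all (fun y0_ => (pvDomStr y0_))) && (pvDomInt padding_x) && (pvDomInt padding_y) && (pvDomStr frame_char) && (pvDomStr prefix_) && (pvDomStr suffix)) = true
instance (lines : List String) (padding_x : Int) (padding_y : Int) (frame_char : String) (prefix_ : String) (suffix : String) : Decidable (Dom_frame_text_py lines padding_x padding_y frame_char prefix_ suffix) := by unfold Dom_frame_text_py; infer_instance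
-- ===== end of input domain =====

-- B replaces A's staged construction (three separate append-loops) by an index-dispatch table:
-- one loop over the row indices range(total) that classifies each index arithmetically as
-- border / padding / content row (objective: alternative decomposition; same cost).

-- Shared Python-builtin helpers (exact: Python's s * n is empty for n ≤ 0, and " " * n likewise).
def pvStrMul (s : String) (n : Int) : List Char := (List.replicate n.toNat s.toList).flatten
def pvSpaces (n : Int) : List Char := List.replicate n.toNat ' '

-- ===== PORT A =====
def frame_text_py (lines : List String) (padding_x : Int) (padding_y : Int) (frame_char : String) (prefix_ : String) (suffix : String) : List String :=
  -- max(map(len, lines)); none = ValueError on empty lines, excluded by Pre_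
  match PySem.List.max? (lines.map PySem.Str.len) (fun x => x) with
  | none => []
  | some max_len =>
    let border := String.ofList (prefix_.toList ++ pvStrMul frame_char (max_len + padding_x * 2 + 2) ++ suffix.toList)
    let blank := String.ofList (prefix_.toList ++ frame_char.toList ++ pvSpaces (max_len + padding_x * 2) ++ frame_char.toList ++ suffix.toList)
    let result := [border]
    let result := (PySem.List.pyRange 0 padding_y 1).foldl (fun acc _ => acc ++ [blank]) result
    let result := lines.foldl (fun acc line =>
      acc ++ [String.ofList (prefix_.toList ++ frame_char.toList ++ pvSpaces padding_x ++ line.toList ++ pvSpaces (padding_x + max_len - PySem.Str.len line) ++ frame_char.toList ++ suffix.toList)]) result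
    let result := (PySem.List.pyRange 0 padding_y 1).foldl (fun acc _ => acc ++ [blank]) result
    result ++ [border]

-- ===== PORT B =====
def frame_text_py_alt (lines : List String) (padding_x : Int) (padding_y : Int) (frame_char : String) (prefix_ : String) (suffix : String) : List String :=
  match PySem.List.max? (lines.map PySem.Str.len) (fun x => x) with
  | none => []
  | some max_len =>
    let p : Int := max padding_y 0
    let total : Int := (lines.length : Int) + 2 * p + 2
    (PySem.List.pyRange 0 total 1).foldl (fun result i =>
      result ++ [
        if i = 0 ∨ i = total - 1 then
          String.ofList (prefix_.toList ++ pvStrMul frame_char (max_len + padding_x * 2 + 2) ++ suffix.toList)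
        else if i ≤ p ∨ total - 1 - p ≤ i then
          String.ofList (prefix_.toList ++ frame_char.toList ++ pvSpaces (max_len + padding_x * 2) ++ frame_char.toList ++ suffix.toList)
        else
          -- lines[i - 1 - p]: the index is in range for every content row
          let line := PySem.List.pyGetD lines (i - 1 - p) ""
          String.ofList (prefix_.toList ++ frame_char.toList ++ pvSpaces padding_x ++ line.toList ++ pvSpaces (padding_x + max_len - PySem.Str.len line) ++ frame_char.toList ++ suffix.toList)]) []

-- ===== PRECONDITION & SPEC =====
-- Pre_ excludes exactly the empty list of lines, on which A raises ValueError (max of empty sequence).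
def Pre_frame_text_py (lines : List String) (padding_x : Int) (padding_y : Int) (frame_char : String) (prefix_ : String) (suffix : String) : Prop := lines ≠ []
instance (lines : List String) (padding_x : Int) (padding_y : Int) (frame_char : String) (prefix_ : String) (suffix : String) : Decidable (Pre_frame_text_py lines padding_x padding_y frame_char prefix_ suffix) := by unfold Pre_frame_text_py; infer_instance

def pvWitness_frame_text_py : List String × Int × Int × String × String × String := (["hi", "a"], 2, 1, "#", "", "")

def Spec_frame_text_py (lines : List String) (padding_x : Int) (padding_y : Int) (frame_char : String) (prefix_ : String) (suffix : String) (out : List String) : Prop := out = frame_text_py_alt lines padding_x padding_y frame_char prefix_ suffix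
instance (lines : List String) (padding_x : Int) (padding_y : Int) (frame_char : String) (prefix_ : String) (suffix : String) (out : List String) : Decidable (Spec_frame_text_py lines padding_x padding_y frame_char prefix_ suffix out) := by unfold Spec_frame_text_py; infer_instance

-- ===== CLAIM =====
def Claim_equal_frame_text_py : Prop := ∀ (lines : List String) (padding_x : Int) (padding_y : Int) (frame_char : String) (prefix_ : String) (suffix : String), Dom_frame_text_py lines padding_x padding_y frame_char prefix_ suffix → Pre_frame_text_py lines padding_x padding_y frame_char prefix_ suffix → Spec_frame_text_py lines padding_x padding_y frame_char prefix_ suffix (frame_text_py lines padding_x padding_y frame_char prefix_ suffix)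

-- ===== LEMMAS AND PROOFS =====

-- A range whose rows all map to the same string maps to a replicate.
theorem map_pyRange_const {β : Type} (f : Int → β) (a b : Int) (c : β)
    (h : ∀ i, a ≤ i → i < b → f i = c) :
    (PySem.List.pyRange a b 1).map f = List.replicate (b - a).toNat c := by
  rw [List.map_congr_left (fun i hi => h i (PySem.List.mem_pyRange_one.mp hi).1 (PySem.List.mem_pyRange_one.mp hi).2),
    List.map_const']
  congr 1
  exact PySem.List.length_pyRange_one a b

-- Indexing every position of a list reproduces the list.
theorem map_getD_range (xs : List String) :
    (List.range xs.length).map (fun k => xs.getD k "") = xs := by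
  apply List.ext_getElem
  · simp
  · intro i h1 h2
    simp [List.getD_eq_getElem?_getD, List.getElem?_eq_getElem h2]

-- ===== VERDICT =====
theorem frame_text_py_spec : Claim_equal_frame_text_py := by
  intro lines px py fc pre suf _ hpre
  unfold Spec_frame_text_py frame_text_py frame_text_py_alt
  cases h : PySem.List.max? (lines.map PySem.Str.len) (fun x => x) with
  | none => rfl
  | some m =>
    simp only [PySem.List.foldl_append_singleton_eq_map, List.nil_append]
    set p : Int := max py 0 with hp
    have hp0 : 0 ≤ p := le_max_right _ _
    have hptn : (p.toNat : Int) = p := Int.toNat_of_nonneg hp0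
    have hpy : py.toNat = p.toNat := by omega
    set N : Nat := lines.length with hN
    have hN1 : 1 ≤ N := by
      cases lines with
      | nil => exact absurd rfl hpre
      | cons a l => simp [hN]
    set total : Int := (N : Int) + 2 * p + 2 with htot
    set border := String.ofList (pre.toList ++ pvStrMul fc (m + px * 2 + 2) ++ suf.toList) with hb
    set blank := String.ofList (pre.toList ++ fc.toList ++ pvSpaces (m + px * 2) ++ fc.toList ++ suf.toList) with hbl
    set cont : String → String := fun line =>
      String.ofList (pre.toList ++ fc.toList ++ pvSpaces px ++ line.toList ++ pvSpaces (px + m - PySem.Str.len line) ++ fc.toList ++ suf.toList) with hc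
    set f : Int → String := fun i =>
      if i = 0 ∨ i = total - 1 then border
      else if i ≤ p ∨ total - 1 - p ≤ i then blank
      else cont (PySem.List.pyGetD lines (i - 1 - p) "") with hf
    -- split range(total) into its five bands
    rw [PySem.List.pyRange_one_append 0 1 total (by omega) (by omega),
      PySem.List.pyRange_one_append 1 (p + 1) total (by omega) (by omega),
      PySem.List.pyRange_one_append (p + 1) (p + 1 + N) total (by omega) (by omega),
      PySem.List.pyRange_one_append (p + 1 + N) (total - 1) total (by omega) (by omega)]
    have hone : PySem.List.pyRange 0 1 1 = [0] := PySem.List.pyRange_one_singleton 0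
    have hlast := PySem.List.pyRange_one_singleton (total - 1)
    rw [sub_add_cancel] at hlast
    have h0 : f 0 = border := by simp [hf]
    have hlastv : f (total - 1) = border := by simp [hf]
    have hband1 : (PySem.List.pyRange 1 (p + 1) 1).map f = List.replicate p.toNat blank := by
      rw [map_pyRange_const f 1 (p + 1) blank (fun i h1 h2 => by
        simp only [hf]
        rw [if_neg (by omega), if_pos (by omega)])]
      congr 1; omega
    have hband3 : (PySem.List.pyRange (p + 1 + N) (total - 1) 1).map f = List.replicate p.toNat blank := by
      rw [map_pyRange_const f (p + 1 + N) (total - 1) blank (fun i h1 h2 => by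
        simp only [hf]
        rw [if_neg (by omega), if_pos (by omega)])]
      congr 1; omega
    have hband2 : (PySem.List.pyRange (p + 1) (p + 1 + N) 1).map f = lines.map cont := by
      rw [PySem.List.pyRange_one, List.map_map]
      have hlen : ((p + 1 + (N : Int)) - (p + 1)).toNat = N := by omega
      rw [hlen]
      have : ∀ k ∈ List.range N, (f ∘ fun k : Nat => p + 1 + (k : Int)) k = cont (lines.getD k "") := by
        intro k hk
        have hkN : k < N := List.mem_range.mp hk
        simp only [Function.comp, hf]
        rw [if_neg (by omega), if_neg (by omega)]
        have hidx : p + 1 + (k : Int) - 1 - p = (k : Int) := by ring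
        rw [hidx, PySem.List.pyGetD_natCast]
      rw [List.map_congr_left this,
        show (List.range N).map (fun k => cont (lines.getD k "")) = ((List.range N).map (fun k => lines.getD k "")).map cont by rw [List.map_map]; simp [Function.comp],
        show List.range N = List.range lines.length from rfl, map_getD_range]
    have hA : (PySem.List.pyRange 0 py 1).map (fun _ => blank) = List.replicate p.toNat blank := by
      rw [map_pyRange_const _ 0 py blank (fun _ _ _ => rfl)]
      congr 1; omega
    rw [List.map_append, List.map_append, List.map_append, List.map_append,
      hone, hlast, hband1, hband2, hband3]
    simp [h0, hlastv, hA, List.append_assoc]
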